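-- pv_equiv track=rewrite | github.com/Jatikbhardwaj/DSA_Python | 4. Advanced Arrays and Matrix/4. Chasing the Dragon.py | solve_dragon_attacks
-- ===== SOURCE A (Python) =====
-- def calculate_prefix_sum(arr):
--     n = len(arr)
--     prefix_sum = [0] * (n + 1)
--     for i in range(1, n + 1):
--         prefix_sum[i] = prefix_sum[i - 1] + arr[i - 1]
--     return prefix_sum
--
-- def min_cost_travel(start, end, n, prefix_sum):
--     if start <= end:
--         clockwise = prefix_sum[end] - prefix_sum[start]
--         anti_clockwise = prefix_sum[n] - clockwise
--     else:
--         anti_clockwise = prefix_sum[start] - prefix_sum[end]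
--         clockwise = prefix_sum[n] - anti_clockwise
--     return min(clockwise, anti_clockwise)
--
-- def solve_dragon_attacks(N, costs, K, attacks):
--     prefix_sum = calculate_prefix_sum(costs)
--
--     current_pos = 1
--     results = []
--
--     for direction, distance in attacks:
--         # Calculate the new position after the dragon's movement
--         new_pos = (current_pos + direction * (distance % N) - 1) % N + 1
--
--         # Calculate the minimum cost to travel to the new position
--         cost = min_cost_travel(current_pos, new_pos, N, prefix_sum)
--         results.append(cost)
--
--         # Update the current position
--         current_pos = new_pos
--
--     return results
-- ===== SOURCE B (Python) =====
-- def solve_dragon_attacks(N, costs, K, attacks):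
--     # Direct per-attack arc summation instead of a precomputed prefix-sum table.
--     total = sum(costs[:N])
--     current_pos = 1
--     results = []
--     for direction, distance in attacks:
--         new_pos = (current_pos + direction * (distance % N) - 1) % N + 1
--         if current_pos <= new_pos:
--             clockwise = sum(costs[current_pos:new_pos])
--         else:
--             clockwise = total - sum(costs[new_pos:current_pos])
--         results.append(min(clockwise, total - clockwise))
--         current_pos = new_pos
--     return results
-- ===== Notes on version B (the rewrite author's own statement) =====
-- stated objective: simpler
-- what changed: Dropped the prefix-sum table and the min_cost_travel helper: B computes total = sum(costs[:N]) once and, per attack, sums the clockwise arc directly with one slice sum, taking min(clockwise, total - clockwise).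
-- outside the precondition, e.g. on solve_dragon_attacks(-2, [1, 2, 3], 0, [(1, 1)]): A returns [1], B returns [0]
import Mathlib
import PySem

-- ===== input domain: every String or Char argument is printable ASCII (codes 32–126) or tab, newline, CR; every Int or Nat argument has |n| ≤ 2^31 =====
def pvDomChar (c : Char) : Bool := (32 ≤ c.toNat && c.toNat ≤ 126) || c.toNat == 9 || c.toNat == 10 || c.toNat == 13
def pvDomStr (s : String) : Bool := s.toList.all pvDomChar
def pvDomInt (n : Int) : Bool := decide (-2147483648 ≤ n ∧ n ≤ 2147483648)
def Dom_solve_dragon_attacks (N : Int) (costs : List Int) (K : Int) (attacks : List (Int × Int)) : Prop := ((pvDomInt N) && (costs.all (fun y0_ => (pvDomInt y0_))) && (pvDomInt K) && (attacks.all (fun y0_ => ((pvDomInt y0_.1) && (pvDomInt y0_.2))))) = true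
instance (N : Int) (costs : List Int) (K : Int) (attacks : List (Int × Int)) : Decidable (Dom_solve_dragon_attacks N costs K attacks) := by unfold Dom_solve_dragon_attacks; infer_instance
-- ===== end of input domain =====

-- B replaces A's prefix-sum table and min_cost_travel lookup by a per-attack direct
-- arc slice sum against total = sum(costs[:N]); objective: simpler (no speed claim).

-- ===== PORT A =====
-- Inside Pre_ every read index (i-1 for i in 1..n, and within min_cost_travel the
-- positions 1..N ≤ len(costs)) is in range, so pyGetD/pySetD are exact here.
def calculate_prefix_sum (arr : List Int) : List Int :=
  (PySem.List.pyRange 1 ((arr.length : Int) + 1)).foldl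
    (fun ps i =>
      PySem.List.pySetD ps i
        (PySem.List.pyGetD ps (i - 1) 0 + PySem.List.pyGetD arr (i - 1) 0))
    (List.replicate (arr.length + 1) 0)

def min_cost_travel (start_ end_ n : Int) (prefix_sum : List Int) : Int :=
  if start_ ≤ end_ then
    let clockwise := PySem.List.pyGetD prefix_sum end_ 0 - PySem.List.pyGetD prefix_sum start_ 0
    let anti_clockwise := PySem.List.pyGetD prefix_sum n 0 - clockwise
    min clockwise anti_clockwise
  else
    let anti_clockwise := PySem.List.pyGetD prefix_sum start_ 0 - PySem.List.pyGetD prefix_sum end_ 0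
    let clockwise := PySem.List.pyGetD prefix_sum n 0 - anti_clockwise
    min clockwise anti_clockwise

def solve_dragon_attacks (N : Int) (costs : List Int) (K : Int) (attacks : List (Int × Int)) : List Int :=
  let prefix_sum := calculate_prefix_sum costs
  (attacks.foldl
    (fun (st : Int × List Int) (a : Int × Int) =>
      let new_pos := PySem.Int.mod (st.1 + a.1 * PySem.Int.mod a.2 N - 1) N + 1
      let cost := min_cost_travel st.1 new_pos N prefix_sum
      (new_pos, st.2 ++ [cost]))
    (1, [])).2

-- ===== PORT B =====
def solve_dragon_attacks_alt (N : Int) (costs : List Int) (K : Int) (attacks : List (Int × Int)) : List Int :=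
  let total := (PySem.List.slice costs none (some N)).sum
  (attacks.foldl
    (fun (st : Int × List Int) (a : Int × Int) =>
      let new_pos := PySem.Int.mod (st.1 + a.1 * PySem.Int.mod a.2 N - 1) N + 1
      let clockwise :=
        if st.1 ≤ new_pos then (PySem.List.slice costs (some st.1) (some new_pos)).sum
        else total - (PySem.List.slice costs (some new_pos) (some st.1)).sum
      (new_pos, st.2 ++ [min clockwise (total - clockwise)]))
    (1, [])).2

-- ===== PRECONDITION & SPEC =====
-- Pre_ restricts to the natural domain (at least one hut and a cost per hut) unless there
-- are no attacks (then A never indexes anything and returns []): outside it A raises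
-- (N = 0: ZeroDivisionError; N > len(costs): IndexError) or, for negative N, returns values
-- produced by Python negative-index wraparound, which B's arc-sum algorithm does not reproduce.
def Pre_solve_dragon_attacks (N : Int) (costs : List Int) (K : Int) (attacks : List (Int × Int)) : Prop :=
  attacks = [] ∨ (1 ≤ N ∧ N ≤ (costs.length : Int))
instance (N : Int) (costs : List Int) (K : Int) (attacks : List (Int × Int)) : Decidable (Pre_solve_dragon_attacks N costs K attacks) := by unfold Pre_solve_dragon_attacks; infer_instance

def pvWitness_solve_dragon_attacks : Int × List Int × Int × (List (Int × Int)) := (3, [1, 2, 3], 0, [(1, 1)])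

def Spec_solve_dragon_attacks (N : Int) (costs : List Int) (K : Int) (attacks : List (Int × Int)) (out : List Int) : Prop := out = solve_dragon_attacks_alt N costs K attacks
instance (N : Int) (costs : List Int) (K : Int) (attacks : List (Int × Int)) (out : List Int) : Decidable (Spec_solve_dragon_attacks N costs K attacks out) := by unfold Spec_solve_dragon_attacks; infer_instance

-- ===== CLAIM (what is proved, stated in full; the proofs are below) =====
def Claim_equal_solve_dragon_attacks : Prop := ∀ (N : Int) (costs : List Int) (K : Int) (attacks : List (Int × Int)), Dom_solve_dragon_attacks N costs K attacks → Pre_solve_dragon_attacks N costs K attacks → Spec_solve_dragon_attacks N costs K attacks (solve_dragon_attacks N costs K attacks)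

-- ===== LEMMAS AND PROOFS =====

-- The prefix loop after processing i = 1..k holds the partial sums up to k (0 beyond).
theorem csum_fold (arr : List Int) (k : Nat) (hk : k ≤ arr.length) :
    (PySem.List.pyRange 1 ((k : Int) + 1)).foldl
      (fun ps i =>
        PySem.List.pySetD ps i
          (PySem.List.pyGetD ps (i - 1) 0 + PySem.List.pyGetD arr (i - 1) 0))
      (List.replicate (arr.length + 1) 0)
    = (List.range (arr.length + 1)).map (fun i => if i ≤ k then (arr.take i).sum else 0) := by
  induction k with
  | zero =>
      rw [PySem.List.pyRange_one_eq_nil (by norm_num), List.foldl_nil]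
      apply List.ext_getElem
      · simp
      · intro j h1 h2
        simp only [List.getElem_replicate, List.getElem_map, List.getElem_range]
        split_ifs with h
        · interval_cases j; simp
        · rfl
  | succ k ih =>
      have hk' : k ≤ arr.length := by omega
      have hcast : ((k + 1 : Nat) : Int) + 1 = ((k : Int) + 1) + 1 := by push_cast; ring
      rw [hcast, PySem.List.pyRange_one_succ_right (by omega), List.foldl_append,
          List.foldl_cons, List.foldl_nil, ih hk']
      have h1 : ((k : Int) + 1 - 1) = (k : Int) := by ring
      have h2 : ((k : Int) + 1) = ((k + 1 : Nat) : Int) := by push_cast; ring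
      rw [h1, h2, PySem.List.pySetD_natCast, PySem.List.pyGetD_natCast,
          PySem.List.pyGetD_natCast,
          PySem.List.getD_map_range _ _ _ _ (by omega),
          List.getD_eq_getElem arr 0 (by omega)]
      simp only [le_refl, if_pos]
      apply List.ext_getElem
      · simp
      · intro j h1 h2
        rw [List.getElem_set]
        simp only [List.getElem_map, List.getElem_range] at *
        split_ifs <;>
          first
            | omega
            | rfl
            | (subst_eqs; exact (List.sum_take_succ arr k (by omega)).symm)

-- Reading the finished table at j gives the sum of the first j costs.
theorem ps_read (arr : List Int) (j : Nat) (hj : j ≤ arr.length) :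
    PySem.List.pyGetD (calculate_prefix_sum arr) ((j : Nat) : Int) 0 = (arr.take j).sum := by
  unfold calculate_prefix_sum
  rw [csum_fold arr arr.length (le_refl _), PySem.List.pyGetD_natCast,
      PySem.List.getD_map_range _ _ _ _ (by omega)]
  simp [hj]

theorem slice_sum (costs : List Int) (a b : Int) (ha : 0 ≤ a) (hab : a ≤ b)
    (hb : b ≤ (costs.length : Int)) :
    (PySem.List.slice costs (some a) (some b)).sum
      = (costs.take b.toNat).sum - (costs.take a.toNat).sum := by
  rw [PySem.List.slice_of_nonneg costs ha (by omega) (by omega) hb]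
  have h : (costs.take b.toNat).sum
      = (costs.take a.toNat).sum + ((costs.drop a.toNat).take (b.toNat - a.toNat)).sum := by
    have h1 : b.toNat = a.toNat + (b.toNat - a.toNat) := by omega
    rw [h1, List.take_add, List.sum_append, Nat.add_sub_cancel_left]
  rw [h]
  ring

-- Per-attack cost: A's table lookup equals B's direct arc sum.
theorem step_cost (N : Int) (costs : List Int) (hN : 1 ≤ N) (hlen : N ≤ (costs.length : Int))
    (s e : Int) (hs1 : 1 ≤ s) (hsN : s ≤ N) (he1 : 1 ≤ e) (heN : e ≤ N) :
    min_cost_travel s e N (calculate_prefix_sum costs)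
      = (if s ≤ e then (PySem.List.slice costs (some s) (some e)).sum
         else (PySem.List.slice costs none (some N)).sum
              - (PySem.List.slice costs (some e) (some s)).sum)
        ⊓ ((PySem.List.slice costs none (some N)).sum
           - (if s ≤ e then (PySem.List.slice costs (some s) (some e)).sum
              else (PySem.List.slice costs none (some N)).sum
                   - (PySem.List.slice costs (some e) (some s)).sum)) := by
  have hs : s = ((s.toNat : Nat) : Int) := by omega
  have he : e = ((e.toNat : Nat) : Int) := by omega
  have hn : N = ((N.toNat : Nat) : Int) := by omega
  have rs := ps_read costs s.toNat (by omega)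
  have re := ps_read costs e.toNat (by omega)
  have rn := ps_read costs N.toNat (by omega)
  have htot : (PySem.List.slice costs none (some N)).sum = (costs.take N.toNat).sum := by
    rw [PySem.List.slice_to costs (by omega)]
  unfold min_cost_travel
  split_ifs with h
  · rw [slice_sum costs s e (by omega) h (by omega), htot, hs, he, hn, rs, re, rn]
    dsimp only
    simp only [Int.toNat_natCast]
  · rw [slice_sum costs e s (by omega) (by omega) (by omega), htot, hs, he, hn, rs, re, rn]
    dsimp only
    simp only [Int.toNat_natCast]
    omega

-- The two loops agree from any in-range position.
theorem loop_eq (N : Int) (costs : List Int) (hN : 1 ≤ N) (hlen : N ≤ (costs.length : Int)) :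
    ∀ (attacks : List (Int × Int)) (cur : Int) (res : List Int), 1 ≤ cur → cur ≤ N →
      (attacks.foldl
        (fun (st : Int × List Int) (a : Int × Int) =>
          let new_pos := PySem.Int.mod (st.1 + a.1 * PySem.Int.mod a.2 N - 1) N + 1
          let cost := min_cost_travel st.1 new_pos N (calculate_prefix_sum costs)
          (new_pos, st.2 ++ [cost]))
        (cur, res)).2
      = (attacks.foldl
        (fun (st : Int × List Int) (a : Int × Int) =>
          let new_pos := PySem.Int.mod (st.1 + a.1 * PySem.Int.mod a.2 N - 1) N + 1
          let clockwise :=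
            if st.1 ≤ new_pos then (PySem.List.slice costs (some st.1) (some new_pos)).sum
            else (PySem.List.slice costs none (some N)).sum
                 - (PySem.List.slice costs (some new_pos) (some st.1)).sum
          (new_pos, st.2 ++ [min clockwise ((PySem.List.slice costs none (some N)).sum - clockwise)]))
        (cur, res)).2 := by
  intro attacks
  induction attacks with
  | nil => intro cur res _ _; rfl
  | cons a rest ih =>
      intro cur res h1 hN'
      simp only [List.foldl_cons]
      have hmod : PySem.Int.mod (cur + a.1 * PySem.Int.mod a.2 N - 1) N
          = (cur + a.1 * PySem.Int.mod a.2 N - 1) % N :=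
        PySem.Int.mod_eq_emod_of_pos (by omega)
      have hge : 0 ≤ (cur + a.1 * PySem.Int.mod a.2 N - 1) % N :=
        Int.emod_nonneg _ (by omega)
      have hlt : (cur + a.1 * PySem.Int.mod a.2 N - 1) % N < N :=
        Int.emod_lt_of_pos _ (by omega)
      have hcost := step_cost N costs hN hlen cur
        (PySem.Int.mod (cur + a.1 * PySem.Int.mod a.2 N - 1) N + 1)
        h1 hN' (by omega) (by omega)
      rw [hcost]
      exact ih _ _ (by omega) (by omega)

-- ===== VERDICT (by name: the statement is the Claim_ definition above) =====
theorem solve_dragon_attacks_spec : Claim_equal_solve_dragon_attacks := by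
  intro N costs K attacks _ hpre
  unfold Spec_solve_dragon_attacks
  rcases hpre with h | ⟨hN, hlen⟩
  · subst h; rfl
  · unfold solve_dragon_attacks solve_dragon_attacks_alt
    exact loop_eq N costs hN hlen attacks 1 [] (le_refl 1) hN
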